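-- pv_equiv track=rewrite | github.com/tomerpq/All-Projects-Of-Tomer-Paz | Python Projects/Proj5/hw5_315311365.py | suffix_prefix_overlap_hash2
-- ===== SOURCE A (Python) =====
-- def suffix_prefix_overlap_hash2(lst, k):
--     newLst = []
--     d1 = {}
--     d2 = {i:lst[i][:k] for i in range(len(lst))}
--     for i in range(len(lst)):
--         if lst[i][-k:] not in d1:
--             d1[lst[i][-k:]] = [i]
--         else:
--             d1[lst[i][-k:]].append(i)
--     for i in d2:
--         if d2[i] in d1:
--             for j in d1[d2[i]]:
--                 if j != i:
--                     newLst.append((j,i))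
--     return newLst
-- ===== SOURCE B (Python) =====
-- def suffix_prefix_overlap_hash2(lst, k):
--     n = len(lst)
--     return [(j, i) for i in range(n) for j in range(n)
--             if j != i and lst[j][-k:] == lst[i][:k]]
-- ===== Notes on version B (the rewrite author's own statement) =====
-- stated objective: simpler
-- what changed: Replaced the two-dictionary hash join (prefix map d2 and suffix-grouping map d1) with a single comprehension over all ordered index pairs that compares the slices inline, preserving A's i-outer/j-ascending output order.
import Mathlib
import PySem

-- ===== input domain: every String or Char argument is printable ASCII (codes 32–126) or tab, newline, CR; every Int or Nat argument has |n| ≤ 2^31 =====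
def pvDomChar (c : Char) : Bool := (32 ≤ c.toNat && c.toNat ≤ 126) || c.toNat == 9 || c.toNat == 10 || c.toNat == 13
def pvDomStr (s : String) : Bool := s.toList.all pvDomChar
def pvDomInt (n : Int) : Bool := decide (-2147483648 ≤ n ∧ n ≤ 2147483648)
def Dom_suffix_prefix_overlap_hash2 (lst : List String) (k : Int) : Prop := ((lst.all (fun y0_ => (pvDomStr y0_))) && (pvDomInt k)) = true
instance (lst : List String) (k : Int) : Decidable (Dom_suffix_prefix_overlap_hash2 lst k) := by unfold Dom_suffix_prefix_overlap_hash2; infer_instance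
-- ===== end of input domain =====

-- B replaces A's two-dictionary hash join by a direct double loop over index pairs (simpler; same output, same order).

-- ===== PORT A =====
def suffix_prefix_overlap_hash2 (lst : List String) (k : Int) : List (Int × Int) :=
  -- d2 = {i: lst[i][:k] for i in range(len(lst))}
  let d2 : PySem.Dict Int String :=
    (PySem.List.pyRange 0 (lst.length : Int) 1).foldl
      (fun d i => d.insert i (PySem.Str.slice (PySem.List.pyGetD lst i "") none (some k)))
      PySem.Dict.empty
  -- first loop: group indices by their k-suffix lst[i][-k:]
  let d1 : PySem.Dict String (List Int) :=
    (PySem.List.pyRange 0 (lst.length : Int) 1).foldl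
      (fun d i =>
        if d.contains (PySem.Str.slice (PySem.List.pyGetD lst i "") (some (-k)) none) = false then
          d.insert (PySem.Str.slice (PySem.List.pyGetD lst i "") (some (-k)) none) [i]
        else
          d.insert (PySem.Str.slice (PySem.List.pyGetD lst i "") (some (-k)) none)
            (d.getD (PySem.Str.slice (PySem.List.pyGetD lst i "") (some (-k)) none) [] ++ [i]))
      PySem.Dict.empty
  -- second loop: for i in d2: if d2[i] in d1: for j in d1[d2[i]]: if j != i: newLst.append((j,i))
  d2.keys.foldl
    (fun acc i =>
      if d1.contains (d2.getD i "") then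
        (d1.getD (d2.getD i "") []).foldl
          (fun acc j => if j ≠ i then acc ++ [(j, i)] else acc) acc
      else acc)
    []

-- ===== PORT B =====
def suffix_prefix_overlap_hash2_alt (lst : List String) (k : Int) : List (Int × Int) :=
  (PySem.List.pyRange 0 (lst.length : Int) 1).flatMap (fun i =>
    (PySem.List.pyRange 0 (lst.length : Int) 1).filterMap (fun j =>
      if j ≠ i ∧ PySem.Str.slice (PySem.List.pyGetD lst j "") (some (-k)) none
               = PySem.Str.slice (PySem.List.pyGetD lst i "") none (some k)
      then some (j, i) else none))

-- ===== PRECONDITION & SPEC =====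
def Spec_suffix_prefix_overlap_hash2 (lst : List String) (k : Int) (out : List (Int × Int)) : Prop := out = suffix_prefix_overlap_hash2_alt lst k
instance (lst : List String) (k : Int) (out : List (Int × Int)) : Decidable (Spec_suffix_prefix_overlap_hash2 lst k out) := by unfold Spec_suffix_prefix_overlap_hash2; infer_instance

-- ===== CLAIM (what is proved, stated in full; the proofs are below) =====
def Claim_equal_suffix_prefix_overlap_hash2 : Prop := ∀ (lst : List String) (k : Int), Dom_suffix_prefix_overlap_hash2 lst k → Spec_suffix_prefix_overlap_hash2 lst k (suffix_prefix_overlap_hash2 lst k)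

-- ===== LEMMAS AND PROOFS =====

-- a fold of inserts at keys avoiding p leaves d.getD p unchanged
theorem pv_getD_foldl_insert_not_mem {ν : Type} (l : List Int) (g : Int → ν) (d : PySem.Dict Int ν)
    (p : Int) (dflt : ν) (hp : p ∉ l) :
    (l.foldl (fun d i => d.insert i (g i)) d).getD p dflt = d.getD p dflt := by
  induction l generalizing d with
  | nil => rfl
  | cons a t ih =>
      simp only [List.foldl_cons]
      rw [ih _ (by simp_all), PySem.Dict.getD_insert_of_ne _ _ _ (by simp_all)]

-- lookup in a dict built by inserting distinct keys
theorem pv_getD_foldl_insert_nodup {ν : Type} (l : List Int) (g : Int → ν) (d : PySem.Dict Int ν)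
    (p : Int) (dflt : ν) (hl : l.Nodup) (hp : p ∈ l) :
    (l.foldl (fun d i => d.insert i (g i)) d).getD p dflt = g p := by
  induction l generalizing d with
  | nil => cases hp
  | cons a t ih =>
      simp only [List.foldl_cons]
      rcases List.mem_cons.1 hp with h | h
      · subst h
        rw [pv_getD_foldl_insert_not_mem _ _ _ _ _ (by simp_all),
            PySem.Dict.getD_insert_self]
      · exact ih _ (List.Nodup.of_cons hl) h

-- the grouping loop of d1: the value stored at p is the ascending list of indices whose key is p
theorem pv_getD_group (l : List Int) (key : Int → String) (d : PySem.Dict String (List Int)) (p : String) :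
    (l.foldl (fun d i =>
        if d.contains (key i) = false then d.insert (key i) [i]
        else d.insert (key i) (d.getD (key i) [] ++ [i])) d).getD p []
      = d.getD p [] ++ l.filter (fun i => key i == p) := by
  induction l generalizing d with
  | nil => simp
  | cons a t ih =>
      simp only [List.foldl_cons]
      have hstep : (if d.contains (key a) = false then d.insert (key a) [a]
          else d.insert (key a) (d.getD (key a) [] ++ [a]))
          = d.insert (key a) (d.getD (key a) [] ++ [a]) := by
        split_ifs with h
        · rw [PySem.Dict.getD_of_not_contains _ _ h]; simp
        · rfl
      rw [hstep, ih]
      by_cases hk : key a = p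
      · subst hk; simp [PySem.Dict.getD_insert_self]
      · rw [PySem.Dict.getD_insert_of_ne _ _ _ (Ne.symm hk)]
        simp [hk]

-- the grouping loop of d1: key membership
theorem pv_contains_group (l : List Int) (key : Int → String) (d : PySem.Dict String (List Int)) (p : String) :
    (l.foldl (fun d i =>
        if d.contains (key i) = false then d.insert (key i) [i]
        else d.insert (key i) (d.getD (key i) [] ++ [i])) d).contains p
      = (d.contains p || l.any (fun i => key i == p)) := by
  induction l generalizing d with
  | nil => simp
  | cons a t ih =>
      simp only [List.foldl_cons, List.any_cons]
      rw [ih]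
      have hc : (if d.contains (key a) = false then d.insert (key a) [a]
          else d.insert (key a) (d.getD (key a) [] ++ [a])).contains p
          = (p == key a || d.contains p) := by
        split_ifs <;> rw [PySem.Dict.contains_insert]
      rw [hc]
      have hsymm : (p == key a) = (key a == p) := by
        simp [eq_comm]
      rw [hsymm]
      cases key a == p <;> cases d.contains p <;> simp

-- folding Set.add over fresh distinct elements appends them in order
theorem pv_foldl_set_add (l : List Int) (s : PySem.Set Int) (hl : l.Nodup)
    (hs : ∀ x ∈ l, x ∉ s) : l.foldl PySem.Set.add s = s ++ l := by
  induction l generalizing s with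
  | nil => simp
  | cons a t ih =>
      simp only [List.foldl_cons]
      have ha : PySem.Set.add s a = s ++ [a] := by
        simp [PySem.Set.add, PySem.Set.contains, hs a (by simp)]
      rw [ha, ih _ (List.Nodup.of_cons hl)]
      · simp
      · intro x hx
        simp only [List.mem_append, List.mem_singleton]
        rintro (h | h)
        · exact hs x (by simp [hx]) h
        · subst h; exact (List.nodup_cons.1 hl).1 hx

-- keys of a dict built by inserting the distinct elements of l, in order, are l itself
theorem pv_keys_range {ν : Type} (l : List Int) (g : Int → ν) (hl : l.Nodup) :
    ((l.foldl (fun d i => d.insert i (g i)) PySem.Dict.empty).keys) = l := by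
  have h := PySem.Dict.keys_foldl_insert_key l (fun i => i) (fun _ i => g i) PySem.Dict.empty
  simp only [List.map_id'] at h
  rw [h]
  have h2 : PySem.Set.update (PySem.Dict.empty : PySem.Dict Int ν).keys l
      = l.foldl PySem.Set.add [] := rfl
  rw [h2, pv_foldl_set_add l [] hl (by simp)]
  simp

-- inner loop of A: 'for j in js: if j != i: out.append((j,i))'
theorem pv_inner (i : Int) (js : List Int) (acc : List (Int × Int)) :
    js.foldl (fun acc j => if j ≠ i then acc ++ [(j, i)] else acc) acc
      = acc ++ (js.filter (fun j => j != i)).map (fun j => (j, i)) := by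
  induction js generalizing acc with
  | nil => simp
  | cons a t ih =>
      simp only [List.foldl_cons, List.filter_cons]
      by_cases h : a = i
      · rw [if_neg (by simp [h]), ih]; simp [h]
      · rw [if_pos h, ih]; simp [h]

-- inner comprehension of B as filter-then-map
theorem pv_b_inner (sfx pfx : Int → String) (i : Int) (l : List Int) :
    l.filterMap (fun j => if j ≠ i ∧ sfx j = pfx i then some (j, i) else none)
      = ((l.filter (fun j => sfx j == pfx i)).filter (fun j => j != i)).map (fun j => (j, i)) := by
  rw [List.filter_filter]
  induction l with
  | nil => simp
  | cons a t ih =>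
      simp only [List.filterMap_cons, List.filter_cons]
      by_cases h1 : a = i
      · simp [h1, ih]
      · by_cases h2 : sfx a = pfx i
        · simp [h1, h2, ih]
        · simp [h1, h2, ih]

-- the core equality, over an arbitrary nodup index list and arbitrary key functions
theorem pv_core (r : List Int) (hnd : r.Nodup) (sfx pfx : Int → String) :
    ((r.foldl (fun d i => d.insert i (pfx i)) (PySem.Dict.empty : PySem.Dict Int String)).keys.foldl
      (fun acc i =>
        if (r.foldl (fun d i =>
              if d.contains (sfx i) = false then d.insert (sfx i) [i]
              else d.insert (sfx i) (d.getD (sfx i) [] ++ [i]))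
            (PySem.Dict.empty : PySem.Dict String (List Int))).contains
            ((r.foldl (fun d i => d.insert i (pfx i)) (PySem.Dict.empty : PySem.Dict Int String)).getD i "") then
          ((r.foldl (fun d i =>
              if d.contains (sfx i) = false then d.insert (sfx i) [i]
              else d.insert (sfx i) (d.getD (sfx i) [] ++ [i]))
            (PySem.Dict.empty : PySem.Dict String (List Int))).getD
            ((r.foldl (fun d i => d.insert i (pfx i)) (PySem.Dict.empty : PySem.Dict Int String)).getD i "") []).foldl
            (fun acc j => if j ≠ i then acc ++ [(j, i)] else acc) acc
        else acc)
      [])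
    = r.flatMap (fun i =>
        r.filterMap (fun j => if j ≠ i ∧ sfx j = pfx i then some (j, i) else none)) := by
  set d2 : PySem.Dict Int String := r.foldl (fun d i => d.insert i (pfx i)) PySem.Dict.empty with hd2
  set d1 : PySem.Dict String (List Int) := r.foldl (fun d i =>
      if d.contains (sfx i) = false then d.insert (sfx i) [i]
      else d.insert (sfx i) (d.getD (sfx i) [] ++ [i])) PySem.Dict.empty with hd1
  have hkeys : d2.keys = r := pv_keys_range r pfx hnd
  have hquery : ∀ p, d1.getD p [] = r.filter (fun j => sfx j == p) := by
    intro p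
    have := pv_getD_group r sfx PySem.Dict.empty p
    simpa [PySem.Dict.getD_empty] using this
  have hcont : ∀ p, d1.contains p = r.any (fun j => sfx j == p) := by
    intro p
    have := pv_contains_group r sfx PySem.Dict.empty p
    simpa [PySem.Dict.contains_empty] using this
  rw [hkeys]
  have hbody : ∀ i ∈ r, ∀ acc : List (Int × Int),
      (if d1.contains (d2.getD i "") then
        (d1.getD (d2.getD i "") []).foldl
          (fun acc j => if j ≠ i then acc ++ [(j, i)] else acc) acc
      else acc)
      = acc ++ ((r.filter (fun j => sfx j == pfx i)).filter (fun j => j != i)).map (fun j => (j, i)) := by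
    intro i hi acc
    have hg : d2.getD i "" = pfx i := pv_getD_foldl_insert_nodup r pfx _ i "" hnd hi
    rw [hg, hcont, hquery, pv_inner]
    split_ifs with h
    · rfl
    · have hfe : r.filter (fun j => sfx j == pfx i) = [] := by
        rw [List.filter_eq_nil_iff]
        intro a ha hsa
        exact h (List.any_eq_true.2 ⟨a, ha, hsa⟩)
      rw [hfe]; simp
  rw [PySem.List.foldl_congr_mem' r _ _ [] hbody,
      PySem.List.foldl_append_eq_flatMap]
  simp only [List.nil_append]
  exact congrFun (congrArg List.flatMap
    (funext fun i => (pv_b_inner sfx pfx i r).symm)) r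

-- ===== VERDICT (by name: the statement is the Claim_ definition above) =====
theorem suffix_prefix_overlap_hash2_spec : Claim_equal_suffix_prefix_overlap_hash2 := by
  intro lst k _
  unfold Spec_suffix_prefix_overlap_hash2 suffix_prefix_overlap_hash2 suffix_prefix_overlap_hash2_alt
  exact pv_core (PySem.List.pyRange 0 (lst.length : Int) 1)
    (PySem.List.nodup_pyRange_one 0 (lst.length : Int))
    (fun i => PySem.Str.slice (PySem.List.pyGetD lst i "") (some (-k)) none)
    (fun i => PySem.Str.slice (PySem.List.pyGetD lst i "") none (some k))
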